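-- pv_equiv track=rewrite | github.com/Navaneeth210805/Phishing_Detection | crawlers/phishtank_crawler.py | _filter_recent_urls
-- ===== SOURCE A (Python) =====
-- from typing import List
--
-- def _filter_recent_urls(urls: List[str]) -> List[str]:
--     """Filter URLs to get most recent/relevant ones"""
--     # Since PhishTank doesn't provide timestamps in free API,
--     # we'll use other heuristics to prioritize URLs
--
--     # Prioritize URLs with suspicious patterns
--     high_priority = []
--     medium_priority = []
--     low_priority = []
--
--     for url in urls:
--         url_lower = url.lower()
--
--         # High priority: Major brand impersonation
--         if any(brand in url_lower for brand in [
--             'paypal', 'amazon', 'microsoft', 'google', 'apple',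
--             'facebook', 'instagram', 'twitter', 'linkedin'
--         ]):
--             high_priority.append(url)
--
--         # Medium priority: Financial/security terms
--         elif any(term in url_lower for term in [
--             'bank', 'login', 'secure', 'verify', 'account',
--             'payment', 'billing', 'credit'
--         ]):
--             medium_priority.append(url)
--
--         # Low priority: Everything else
--         else:
--             low_priority.append(url)
--
--     # Return prioritized list
--     return high_priority + medium_priority + low_priority
-- ===== SOURCE B (Python) =====
-- from typing import List
--
-- # One flat keyword -> tier table (0 = brand, 1 = financial/security term).
-- _KEYWORD_TIERS = {
--     'paypal': 0, 'amazon': 0, 'microsoft': 0, 'google': 0, 'apple': 0,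
--     'facebook': 0, 'instagram': 0, 'twitter': 0, 'linkedin': 0,
--     'bank': 1, 'login': 1, 'secure': 1, 'verify': 1, 'account': 1,
--     'payment': 1, 'billing': 1, 'credit': 1,
-- }
--
-- def _rank(url: str) -> int:
--     low = url.lower()
--     return min((tier for kw, tier in _KEYWORD_TIERS.items() if kw in low),
--                default=2)
--
-- def _filter_recent_urls(urls: List[str]) -> List[str]:
--     """Filter URLs to get most recent/relevant ones"""
--     # One stable sort by the minimum matching tier reproduces the
--     # high + medium + low concatenation of the original.
--     return sorted(urls, key=_rank)
-- ===== Notes on version B (the rewrite author's own statement) =====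
-- stated objective: simpler
-- what changed: Replaces the three-bucket partition-and-concatenate loop with one keyword->tier table, a rank computed as the minimum matching tier (default 2), and a single stable sort by that rank; stability preserves the original order within each tier.
import Mathlib
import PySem

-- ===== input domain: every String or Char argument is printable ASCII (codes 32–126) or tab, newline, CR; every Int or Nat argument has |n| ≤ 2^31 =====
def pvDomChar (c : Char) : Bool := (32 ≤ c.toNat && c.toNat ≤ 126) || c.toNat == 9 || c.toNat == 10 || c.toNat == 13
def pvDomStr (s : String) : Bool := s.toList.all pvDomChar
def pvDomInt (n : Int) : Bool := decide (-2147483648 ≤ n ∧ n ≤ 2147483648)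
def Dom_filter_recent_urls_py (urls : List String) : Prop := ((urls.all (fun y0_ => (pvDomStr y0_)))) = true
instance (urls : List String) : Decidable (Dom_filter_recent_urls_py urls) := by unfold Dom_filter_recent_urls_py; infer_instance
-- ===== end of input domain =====

-- B replaces A's three-bucket partition-and-concatenate with one keyword->tier table, a minimum-matching-tier rank, and a single stable sort by that rank (objective: simpler).


-- ===== PORT A =====
def pvHighA : List String :=
  ["paypal", "amazon", "microsoft", "google", "apple",
   "facebook", "instagram", "twitter", "linkedin"]

def pvMedA : List String :=
  ["bank", "login", "secure", "verify", "account",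
   "payment", "billing", "credit"]

def pvStepA (acc : List String × List String × List String) (url : String) :
    List String × List String × List String :=
  let url_lower := PySem.Str.lower url
  if pvHighA.any (fun brand => PySem.Str.isIn brand url_lower) then
    (acc.1 ++ [url], acc.2.1, acc.2.2)
  else if pvMedA.any (fun term => PySem.Str.isIn term url_lower) then
    (acc.1, acc.2.1 ++ [url], acc.2.2)
  else
    (acc.1, acc.2.1, acc.2.2 ++ [url])

def filter_recent_urls_py (urls : List String) : List String :=
  let acc := urls.foldl pvStepA ([], [], [])
  acc.1 ++ acc.2.1 ++ acc.2.2

-- ===== PORT B =====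
-- the keyword -> tier dict, as an insertion-order association list
def pvKeywordTiers : List (String × Int) :=
  [("paypal", 0), ("amazon", 0), ("microsoft", 0), ("google", 0), ("apple", 0),
   ("facebook", 0), ("instagram", 0), ("twitter", 0), ("linkedin", 0),
   ("bank", 1), ("login", 1), ("secure", 1), ("verify", 1), ("account", 1),
   ("payment", 1), ("billing", 1), ("credit", 1)]

-- min(tiers-of-matching-keywords, default=2); the fold with seed 2 is exact
-- here since every tier in the table is ≤ 2
def pvRank (url : String) : Int :=
  let low := PySem.Str.lower url
  ((pvKeywordTiers.filter (fun p => PySem.Str.isIn p.1 low)).map Prod.snd).foldl min 2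

def filter_recent_urls_py_alt (urls : List String) : List String :=
  PySem.List.sorted urls pvRank false

-- ===== PRECONDITION & SPEC =====
def Spec_filter_recent_urls_py (urls : List String) (out : List String) : Prop := out = filter_recent_urls_py_alt urls
instance (urls : List String) (out : List String) : Decidable (Spec_filter_recent_urls_py urls out) := by unfold Spec_filter_recent_urls_py; infer_instance

-- ===== CLAIM (what is proved, stated in full; the proofs are below) =====
def Claim_equal_filter_recent_urls_py : Prop := ∀ (urls : List String), Dom_filter_recent_urls_py urls → Spec_filter_recent_urls_py urls (filter_recent_urls_py urls)

-- ===== LEMMAS AND PROOFS =====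

-- inserting past a block of elements it does not go before
lemma insertBy_append_of_not_before {α : Type} (before : α → α → Bool) (x : α)
    (ys zs : List α) (h : ∀ y ∈ ys, before x y = false) :
    PySem.List.insertBy before x (ys ++ zs) = ys ++ PySem.List.insertBy before x zs := by
  induction ys with
  | nil => simp
  | cons a t ih =>
      simp [PySem.List.insertBy, h a (by simp),
            ih (fun y hy => h y (List.mem_cons_of_mem a hy))]

-- inserting in front of a block of elements it goes before
lemma insertBy_of_forall_before {α : Type} (before : α → α → Bool) (x : α)
    (zs : List α) (h : ∀ z ∈ zs, before x z = true) :
    PySem.List.insertBy before x zs = x :: zs := by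
  cases zs with
  | nil => simp [PySem.List.insertBy]
  | cons z t => simp [PySem.List.insertBy, h z (by simp)]

-- a stable sort by a three-valued key is the concatenation of the three rank classes
lemma sorted_three_valued {α : Type} (rank : α → Int)
    (hr : ∀ x, rank x = 0 ∨ rank x = 1 ∨ rank x = 2) (xs : List α) :
    PySem.List.sorted xs rank false =
      xs.filter (fun u => rank u == 0) ++ (xs.filter (fun u => rank u == 1)
        ++ xs.filter (fun u => rank u == 2)) := by
  rw [PySem.List.sorted_eq_foldl_insertBy]
  induction xs using List.reverseRecOn with
  | nil => simp
  | append_singleton xs x ih =>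
      rw [List.foldl_append, List.foldl_cons, List.foldl_nil, ih]
      have h0 : ∀ y ∈ xs.filter (fun u => rank u == 0), rank y = 0 := by
        intro y hy; simpa using (List.mem_filter.mp hy).2
      have h1 : ∀ y ∈ xs.filter (fun u => rank u == 1), rank y = 1 := by
        intro y hy; simpa using (List.mem_filter.mp hy).2
      have h2 : ∀ y ∈ xs.filter (fun u => rank u == 2), rank y = 2 := by
        intro y hy; simpa using (List.mem_filter.mp hy).2
      rcases hr x with hx | hx | hx
      · -- rank x = 0: x goes right after the rank-0 block
        rw [insertBy_append_of_not_before _ _ _ _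
              (fun y hy => by simp [hx, h0 y hy]),
            insertBy_of_forall_before _ _ _
              (fun z hz => by
                rcases List.mem_append.mp hz with hz | hz
                · simp [hx, h1 z hz]
                · simp [hx, h2 z hz])]
        simp [List.filter_append, hx]
      · -- rank x = 1: x goes right after the rank-1 block
        rw [insertBy_append_of_not_before _ _ _ _
              (fun y hy => by simp [hx, h0 y hy]),
            insertBy_append_of_not_before _ _ _ _
              (fun y hy => by simp [hx, h1 y hy]),
            insertBy_of_forall_before _ _ _
              (fun z hz => by simp [hx, h2 z hz])]
        simp [List.filter_append, hx]
      · -- rank x = 2: x goes to the very end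
        rw [insertBy_append_of_not_before _ _ _ _
              (fun y hy => by simp [hx, h0 y hy]),
            insertBy_append_of_not_before _ _ _ _
              (fun y hy => by simp [hx, h1 y hy]),
            PySem.List.insertBy_of_forall_not_before _ _ _
              (fun y hy => by simp [hx, h2 y hy])]
        simp [List.filter_append, hx]

-- the keyword table is A's two lists tagged with their tiers
lemma keywordTiers_split :
    pvKeywordTiers = pvHighA.map (fun s => (s, (0 : Int)))
      ++ pvMedA.map (fun s => (s, (1 : Int))) := by rfl

-- filtering a constant-tier tagged list and projecting the tiers gives a replicate
lemma map_snd_filter_map (l : List String) (c : Int) (g : String → Bool) :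
    (((l.map (fun s => (s, c))).filter (fun p => g p.1)).map Prod.snd) =
      List.replicate (l.filter g).length c := by
  induction l with
  | nil => simp
  | cons a t ih =>
      by_cases h : g a = true <;> simp [h, ih, List.replicate_succ]

lemma foldl_min_replicate (n : Nat) (c x : Int) :
    (List.replicate n x).foldl min c = if n = 0 then c else min c x := by
  induction n generalizing c with
  | zero => simp
  | succ m ih => simp [List.replicate_succ, ih]

-- B's minimum-tier rank equals A's if/elif classification
lemma rank_eq (u : String) :
    pvRank u =
      if pvHighA.any (fun brand => PySem.Str.isIn brand (PySem.Str.lower u)) then 0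
      else if pvMedA.any (fun term => PySem.Str.isIn term (PySem.Str.lower u)) then 1
      else 2 := by
  unfold pvRank
  rw [keywordTiers_split]
  dsimp only
  rw [List.filter_append, List.map_append,
      map_snd_filter_map _ _ (fun s => PySem.Str.isIn s (PySem.Str.lower u)),
      map_snd_filter_map _ _ (fun s => PySem.Str.isIn s (PySem.Str.lower u)),
      List.foldl_append, foldl_min_replicate, foldl_min_replicate]
  by_cases hA0 : (pvHighA.filter (fun s => PySem.Str.isIn s (PySem.Str.lower u))).length = 0
  · have h1 : ¬ ((pvHighA.any fun brand => PySem.Str.isIn brand (PySem.Str.lower u)) = true) := by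
      simp_all [List.length_eq_zero_iff, List.filter_eq_nil_iff, List.any_eq_true]
    by_cases hB0 : (pvMedA.filter (fun s => PySem.Str.isIn s (PySem.Str.lower u))).length = 0
    · have h2 : ¬ ((pvMedA.any fun term => PySem.Str.isIn term (PySem.Str.lower u)) = true) := by
        simp_all [List.length_eq_zero_iff, List.filter_eq_nil_iff, List.any_eq_true]
      rw [if_pos hB0, if_pos hA0, if_neg h1, if_neg h2]
    · have h2 : (pvMedA.any fun term => PySem.Str.isIn term (PySem.Str.lower u)) = true := by
        simp_all [List.length_eq_zero_iff, List.filter_eq_nil_iff, List.any_eq_true]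
      rw [if_neg hB0, if_pos hA0, if_neg h1, if_pos h2]
      decide
  · have h1 : (pvHighA.any fun brand => PySem.Str.isIn brand (PySem.Str.lower u)) = true := by
      simp_all [List.length_eq_zero_iff, List.filter_eq_nil_iff, List.any_eq_true]
    rw [if_neg hA0, if_pos h1]
    split_ifs <;> decide

lemma pvRank_cases (u : String) : pvRank u = 0 ∨ pvRank u = 1 ∨ pvRank u = 2 := by
  rw [rank_eq]; split_ifs <;> simp

-- A's partition loop, characterised by filters on B's rank
lemma foldl_stepA (xs : List String) (h m l : List String) :
    xs.foldl pvStepA (h, m, l) =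
      (h ++ xs.filter (fun u => pvRank u == 0),
       m ++ xs.filter (fun u => pvRank u == 1),
       l ++ xs.filter (fun u => pvRank u == 2)) := by
  induction xs generalizing h m l with
  | nil => simp
  | cons x t ih =>
      by_cases hH : pvHighA.any (fun brand => PySem.Str.isIn brand (PySem.Str.lower x)) = true
      · have r : pvRank x = 0 := by rw [rank_eq, if_pos hH]
        rw [List.foldl_cons, show pvStepA (h, m, l) x = (h ++ [x], m, l) by
              unfold pvStepA; dsimp only; rw [if_pos hH], ih]
        simp [r]
      · by_cases hM : pvMedA.any (fun term => PySem.Str.isIn term (PySem.Str.lower x)) = true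
        · have r : pvRank x = 1 := by rw [rank_eq, if_neg hH, if_pos hM]
          rw [List.foldl_cons, show pvStepA (h, m, l) x = (h, m ++ [x], l) by
                unfold pvStepA; dsimp only; rw [if_neg hH, if_pos hM], ih]
          simp [r]
        · have r : pvRank x = 2 := by rw [rank_eq, if_neg hH, if_neg hM]
          rw [List.foldl_cons, show pvStepA (h, m, l) x = (h, m, l ++ [x]) by
                unfold pvStepA; dsimp only; rw [if_neg hH, if_neg hM], ih]
          simp [r]

-- ===== VERDICT (by name: the statement is the Claim_ definition above) =====
theorem filter_recent_urls_py_spec : Claim_equal_filter_recent_urls_py := by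
  intro urls _
  show filter_recent_urls_py urls = filter_recent_urls_py_alt urls
  unfold filter_recent_urls_py filter_recent_urls_py_alt
  rw [sorted_three_valued pvRank pvRank_cases, foldl_stepA urls [] [] []]
  simp
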